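-- pv_equiv track=rewrite | github.com/malusccp/Labiras | vegancraft/setup.py | calcular_ingredientes
-- ===== SOURCE A (Python) =====
-- def calcular_ingredientes(id_item, receitas, quantidade_desejada):
--     materias_primas_finais = {}
--     fila = [(id_item, quantidade_desejada)]
--
--     while fila:
--         item_atual_id, quantidade_atual = fila.pop(0)
--
--         if item_atual_id in receitas:
--             for id_ingrediente, qtd_por_unidade in receitas[item_atual_id]['ingredientes'].items():
--                 qtd_total_ingrediente = quantidade_atual * qtd_por_unidade
--                 fila.append((id_ingrediente, qtd_total_ingrediente))
--         else:
--             if item_atual_id not in materias_primas_finais: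
--                 materias_primas_finais[item_atual_id] = 0
--             materias_primas_finais[item_atual_id] += quantidade_atual
--
--     return materias_primas_finais
-- ===== SOURCE B (Python) =====
-- def calcular_ingredientes(id_item, receitas, quantidade_desejada):
--     # Level-synchronous expansion with per-level aggregation: instead of a FIFO
--     # queue holding one entry per expansion-tree node, keep one aggregated
--     # quantity per item id per level.
--     totais = {}
--     frente = {id_item: quantidade_desejada}
--     while frente:
--         proxima = {}
--         for item, qtd in frente.items():
--             if item in receitas:
--                 for ing, por_unidade in receitas[item]['ingredientes'].items():
--                     proxima[ing] = proxima.get(ing, 0) + qtd * por_unidade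
--             else:
--                 totais[item] = totais.get(item, 0) + qtd
--         frente = proxima
--     return totais
-- ===== Notes on version B (the rewrite author's own statement) =====
-- stated objective: alternative
-- what changed: A pops one FIFO-queue entry per expansion-tree node; B expands level-synchronously, aggregating the quantities of equal item ids into one dict entry per level, so each item id is processed at most once per level.
import Mathlib
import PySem

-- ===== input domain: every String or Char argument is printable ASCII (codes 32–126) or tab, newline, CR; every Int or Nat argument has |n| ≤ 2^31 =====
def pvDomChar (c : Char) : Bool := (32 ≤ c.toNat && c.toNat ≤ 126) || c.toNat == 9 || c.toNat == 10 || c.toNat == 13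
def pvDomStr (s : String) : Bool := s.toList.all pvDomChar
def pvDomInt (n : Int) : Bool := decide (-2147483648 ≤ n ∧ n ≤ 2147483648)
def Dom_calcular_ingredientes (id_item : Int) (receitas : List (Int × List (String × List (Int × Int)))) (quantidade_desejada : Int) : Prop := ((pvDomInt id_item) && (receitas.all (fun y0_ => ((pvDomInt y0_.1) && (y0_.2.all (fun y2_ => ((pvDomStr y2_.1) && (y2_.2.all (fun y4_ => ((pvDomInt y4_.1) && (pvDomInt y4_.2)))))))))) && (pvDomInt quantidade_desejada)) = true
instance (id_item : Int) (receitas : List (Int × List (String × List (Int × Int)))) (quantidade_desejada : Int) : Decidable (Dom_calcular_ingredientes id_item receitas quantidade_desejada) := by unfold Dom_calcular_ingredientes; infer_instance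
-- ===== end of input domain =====

-- B replaces A's one-entry-per-tree-node FIFO queue by level-synchronous expansion that
-- aggregates the quantities of equal item ids into one dict entry per level; equivalence
-- of the RETURN value is proved on Pre_ (where Python A returns at all).

abbrev PvRec : Type := List (Int × List (String × List (Int × Int)))

-- shared sub-expression of both Pythons: receitas[item]['ingredientes']
-- (.getD [] is a totality guard: Python raises KeyError there; Pre_ excludes those inputs)
def pvIngredientes (receitas : PvRec) (item : Int) : List (Int × Int) :=
  ((PySem.Dict.mk (((PySem.Dict.mk receitas).get? item).getD [])).get? "ingredientes").getD []

def pvExpand (receitas : PvRec) (item qtd : Int) : List (Int × Int) :=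
  (pvIngredientes receitas item).map (fun q => (q.1, qtd * q.2))

-- ===== PORT A =====
-- one queue "level" and the exact number of queue pops A performs when its expansion
-- terminates within receitas.length + 2 levels; used only as loop fuel (totality guard:
-- on cyclic recipe graphs Python A never returns, and Pre_ excludes those inputs)
def pvChildren (receitas : PvRec) (lvl : List (Int × Int)) : List (Int × Int) :=
  lvl.flatMap (fun p => if (PySem.Dict.mk receitas).contains p.1 then pvExpand receitas p.1 p.2 else [])

def pvCost (receitas : PvRec) : Nat → List (Int × Int) → Nat
  | 0, _ => 0
  | n+1, lvl => lvl.length + pvCost receitas n (pvChildren receitas lvl)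

def pvLoopA (receitas : PvRec) : Nat → PySem.Dict Int Int → List (Int × Int) → PySem.Dict Int Int
  | 0, mat, _ => mat
  | f+1, mat, fila =>
    match fila with
    | [] => mat
    | (item, qtd) :: rest =>
      if (PySem.Dict.mk receitas).contains item then
        pvLoopA receitas f mat (rest ++ pvExpand receitas item qtd)
      else
        -- if item not in materias: materias[item] = 0; materias[item] += qtd
        let m1 := if mat.contains item then mat else mat.insert item 0
        pvLoopA receitas f (m1.insert item (m1.getD item 0 + qtd)) rest

def calcular_ingredientes (id_item : Int) (receitas : List (Int × List (String × List (Int × Int)))) (quantidade_desejada : Int) : List (Int × Int) :=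
  (pvLoopA receitas (pvCost receitas (receitas.length + 2) [(id_item, quantidade_desejada)])
    PySem.Dict.empty [(id_item, quantidade_desejada)]).items

-- ===== PORT B =====
-- d[k] = d.get(k, 0) + v
def pvAdd (d : PySem.Dict Int Int) (k v : Int) : PySem.Dict Int Int := d.insert k (d.getD k 0 + v)

-- the body of B's "for item, qtd in frente.items()" loop, on the state (totais, proxima)
def pvStepB (receitas : PvRec) (s : PySem.Dict Int Int × PySem.Dict Int Int) (p : Int × Int) :
    PySem.Dict Int Int × PySem.Dict Int Int :=
  if (PySem.Dict.mk receitas).contains p.1 then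
    (s.1, (pvIngredientes receitas p.1).foldl (fun nf q => pvAdd nf q.1 (p.2 * q.2)) s.2)
  else
    (pvAdd s.1 p.1 p.2, s.2)

-- B's "while frente:" loop; fuel receitas.length + 2 is a totality guard only (on Pre_
-- inputs the frontier is empty after at most that many levels)
def pvLoopB (receitas : PvRec) : Nat → PySem.Dict Int Int → PySem.Dict Int Int → PySem.Dict Int Int
  | 0, totais, _ => totais
  | f+1, totais, frente =>
    if frente.items = [] then totais
    else
      let s := frente.items.foldl (pvStepB receitas) (totais, PySem.Dict.empty)
      pvLoopB receitas f s.1 s.2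

def calcular_ingredientes_alt (id_item : Int) (receitas : List (Int × List (String × List (Int × Int)))) (quantidade_desejada : Int) : List (Int × Int) :=
  (pvLoopB receitas (receitas.length + 2) PySem.Dict.empty
    (PySem.Dict.empty.insert id_item quantidade_desejada)).items

-- ===== PRECONDITION & SPEC =====
-- ids reachable from s in exactly n ingredient-reference steps
def pvNbrIds (receitas : PvRec) (x : Int) : List Int := (pvIngredientes receitas x).map (·.1)

def pvReach (receitas : PvRec) : Nat → List Int → List Int
  | 0, s => s
  | n+1, s => pvReach receitas n (s.flatMap (pvNbrIds receitas))

-- Pre_: (1) every chain of ingredient references starting at id_item ends within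
-- receitas.length + 1 steps (the recipe graph reachable from id_item is acyclic) — on
-- cyclic inputs Python A loops forever and returns nothing; (2) every reachable recipe
-- entry has the key 'ingredientes' — Python A raises KeyError otherwise; (3) all dicts
-- have duplicate-free key lists — a Python dict cannot carry duplicate keys, so this
-- excludes no Python input.
def Pre_calcular_ingredientes (id_item : Int) (receitas : List (Int × List (String × List (Int × Int)))) (quantidade_desejada : Int) : Prop :=
  pvReach receitas (receitas.length + 2) [id_item] = []
  ∧ (∀ k ∈ List.range (receitas.length + 2), ∀ x ∈ pvReach receitas k [id_item],
      ∀ e, (PySem.Dict.mk receitas).get? x = some e → ((PySem.Dict.mk e).get? "ingredientes").isSome)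
  ∧ (receitas.map (·.1)).Nodup
  ∧ (∀ p ∈ receitas, (p.2.map (·.1)).Nodup ∧ ∀ q ∈ p.2, (q.2.map (·.1)).Nodup)

instance (id_item : Int) (receitas : List (Int × List (String × List (Int × Int)))) (quantidade_desejada : Int) : Decidable (Pre_calcular_ingredientes id_item receitas quantidade_desejada) := by
  unfold Pre_calcular_ingredientes; infer_instance

def pvWitness_calcular_ingredientes : Int × (List (Int × List (String × List (Int × Int)))) × Int :=
  (1, [(1, [("ingredientes", [(2, 3)])])], 5)

def Spec_calcular_ingredientes (id_item : Int) (receitas : List (Int × List (String × List (Int × Int)))) (quantidade_desejada : Int) (out : List (Int × Int)) : Prop := out = calcular_ingredientes_alt id_item receitas quantidade_desejada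
instance (id_item : Int) (receitas : List (Int × List (String × List (Int × Int)))) (quantidade_desejada : Int) (out : List (Int × Int)) : Decidable (Spec_calcular_ingredientes id_item receitas quantidade_desejada out) := by unfold Spec_calcular_ingredientes; infer_instance

-- ===== CLAIM (what is proved, stated in full; the proofs are below) =====
def Claim_equal_calcular_ingredientes : Prop := ∀ (id_item : Int) (receitas : List (Int × List (String × List (Int × Int)))) (quantidade_desejada : Int), Dom_calcular_ingredientes id_item receitas quantidade_desejada → Pre_calcular_ingredientes id_item receitas quantidade_desejada → Spec_calcular_ingredientes id_item receitas quantidade_desejada (calcular_ingredientes id_item receitas quantidade_desejada)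

-- ===== LEMMAS AND PROOFS =====

-- proof-side vocabulary
def pvAddAll (d : PySem.Dict Int Int) (l : List (Int × Int)) : PySem.Dict Int Int :=
  l.foldl (fun d p => pvAdd d p.1 p.2) d

def pvLeafAdd (receitas : PvRec) (d : PySem.Dict Int Int) (lvl : List (Int × Int)) : PySem.Dict Int Int :=
  lvl.foldl (fun d p => if (PySem.Dict.mk receitas).contains p.1 then d else pvAdd d p.1 p.2) d

def pvRun (receitas : PvRec) : Nat → PySem.Dict Int Int → List (Int × Int) → PySem.Dict Int Int
  | 0, d, _ => d
  | n+1, d, lvl => pvRun receitas n (pvLeafAdd receitas d lvl) (pvChildren receitas lvl)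

-- "processing key k again only touches keys that state s already carries"
def pvP (receitas : PvRec) (s : PySem.Dict Int Int × PySem.Dict Int Int) (k : Int) : Prop :=
  if (PySem.Dict.mk receitas).contains k = true then
    ∀ q ∈ pvIngredientes receitas k, s.2.contains q.1 = true
  else s.1.contains k = true

-- ---------- A's leaf branch is pvAdd ----------
lemma pv_setdefault_eq (mat : PySem.Dict Int Int) (k v : Int) :
    ((if mat.contains k then mat else mat.insert k 0).insert k
      ((if mat.contains k then mat else mat.insert k 0).getD k 0 + v)) = pvAdd mat k v := by
  by_cases h : mat.contains k = true
  · simp [h, pvAdd]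
  · have h' : mat.contains k = false := by simpa using h
    simp [h', pvAdd, PySem.Dict.getD_insert, PySem.Dict.insert_insert_self,
      PySem.Dict.getD_of_not_contains _ _ h']

-- ---------- A processes its queue level by level ----------
lemma pvChildren_cons (receitas : PvRec) (p : Int × Int) (l : List (Int × Int)) :
    pvChildren receitas (p :: l)
      = (if (PySem.Dict.mk receitas).contains p.1 then pvExpand receitas p.1 p.2 else [])
        ++ pvChildren receitas l := by
  simp [pvChildren]

lemma pvLeafAdd_cons_rec (receitas : PvRec) (d : PySem.Dict Int Int) (p : Int × Int)
    (l : List (Int × Int)) (h : (PySem.Dict.mk receitas).contains p.1 = true) :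
    pvLeafAdd receitas d (p :: l) = pvLeafAdd receitas d l := by
  have h' : (receitas.any fun q => q.1 == p.1) = true := by
    simpa [PySem.Dict.contains_mk] using h
  simp [pvLeafAdd, h']

lemma pvLeafAdd_cons_leaf (receitas : PvRec) (d : PySem.Dict Int Int) (p : Int × Int)
    (l : List (Int × Int)) (h : ¬ (PySem.Dict.mk receitas).contains p.1 = true) :
    pvLeafAdd receitas d (p :: l) = pvLeafAdd receitas (pvAdd d p.1 p.2) l := by
  have h0 : (PySem.Dict.mk receitas).contains p.1 = false := Bool.eq_false_iff.mpr h
  have h' : (receitas.any fun q => q.1 == p.1) = false := by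
    rwa [PySem.Dict.contains_mk] at h0
  simp [pvLeafAdd, h']

lemma pvLoopA_level (receitas : PvRec) (xs : List (Int × Int)) :
    ∀ (ys : List (Int × Int)) (f : Nat) (d : PySem.Dict Int Int),
      pvLoopA receitas (f + xs.length) d (xs ++ ys)
        = pvLoopA receitas f (pvLeafAdd receitas d xs) (ys ++ pvChildren receitas xs) := by
  induction xs with
  | nil => intro ys f d; simp [pvLeafAdd, pvChildren]
  | cons p xs ih =>
    intro ys f d
    obtain ⟨k, v⟩ := p
    rw [show f + ((k, v) :: xs).length = (f + xs.length) + 1 by simp [List.length_cons]; omega]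
    by_cases h : (PySem.Dict.mk receitas).contains k = true
    · have hstep : pvLoopA receitas ((f + xs.length) + 1) d (((k, v) :: xs) ++ ys)
          = pvLoopA receitas (f + xs.length) d ((xs ++ ys) ++ pvExpand receitas k v) := by
        simp [pvLoopA, h]
      rw [hstep, List.append_assoc, ih (ys ++ pvExpand receitas k v) f d,
        pvChildren_cons, pvLeafAdd_cons_rec receitas d (k, v) xs h]
      simp [h, List.append_assoc]
    · have hstep : pvLoopA receitas ((f + xs.length) + 1) d (((k, v) :: xs) ++ ys)
          = pvLoopA receitas (f + xs.length) (pvAdd d k v) (xs ++ ys) := by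
        simp only [List.cons_append, pvLoopA, h, if_false, Bool.false_eq_true]
        rw [pv_setdefault_eq]
      rw [hstep, ih ys f (pvAdd d k v), pvChildren_cons,
        pvLeafAdd_cons_leaf receitas d (k, v) xs h]
      simp [h]

lemma pvLoopA_run (receitas : PvRec) :
    ∀ (n : Nat) (d : PySem.Dict Int Int) (lvl : List (Int × Int)),
      pvLoopA receitas (pvCost receitas n lvl) d lvl = pvRun receitas n d lvl := by
  intro n
  induction n with
  | zero => intro d lvl; rfl
  | succ n ih =>
    intro d lvl
    have h1 : pvCost receitas (n+1) lvl
        = pvCost receitas n (pvChildren receitas lvl) + lvl.length := by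
      simp [pvCost]; omega
    have h2 := pvLoopA_level receitas lvl [] (pvCost receitas n (pvChildren receitas lvl)) d
    simp only [List.append_nil, List.nil_append] at h2
    rw [h1, h2, ih]
    rfl

-- ---------- dict-accumulation toolkit ----------
lemma pvAdd_contains (d : PySem.Dict Int Int) (k v k' : Int) :
    (pvAdd d k v).contains k' = (k' == k || d.contains k') := by
  simp [pvAdd, PySem.Dict.contains_insert]

lemma pvAdd_contains_self (d : PySem.Dict Int Int) (k v : Int) :
    (pvAdd d k v).contains k = true := by
  simp [pvAdd, PySem.Dict.contains_insert_self]

lemma pvAdd_contains_mono (d : PySem.Dict Int Int) (k v k' : Int)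
    (h : d.contains k' = true) : (pvAdd d k v).contains k' = true := by
  simp [pvAdd_contains, h]

lemma pvAdd_same (d : PySem.Dict Int Int) (k u v : Int) :
    pvAdd (pvAdd d k u) k v = pvAdd d k (u + v) := by
  unfold pvAdd
  rw [PySem.Dict.getD_insert, PySem.Dict.insert_insert_self]
  simp [add_assoc]

lemma pvAdd_nodup (d : PySem.Dict Int Int) (k v : Int) (h : d.keys.Nodup) :
    (pvAdd d k v).keys.Nodup := PySem.Dict.nodup_keys_insert d k _ h

lemma pv_insert_comm (d : PySem.Dict Int Int) (j k a b : Int) (hjk : j ≠ k)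
    (hk : d.contains k = true) :
    (d.insert j a).insert k b = (d.insert k b).insert j a := by
  apply PySem.Dict.ext
  have hk1 : (d.insert j a).contains k = true := by
    simp [PySem.Dict.contains_insert, hk]
  by_cases hj : d.contains j = true
  · have hj1 : (d.insert k b).contains j = true := by
      simp [PySem.Dict.contains_insert, hj]
    rw [PySem.Dict.items_insert_of_contains _ _ hk1, PySem.Dict.items_insert_of_contains _ _ hj,
      PySem.Dict.items_insert_of_contains _ _ hj1, PySem.Dict.items_insert_of_contains _ _ hk]
    simp only [List.map_map]
    apply List.map_congr_left
    intro p _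
    by_cases h1 : p.1 = j <;> by_cases h2 : p.1 = k <;>
      simp_all [Function.comp, beq_iff_eq, hjk, Ne.symm hjk]
  · have hj' : d.contains j = false := by simpa using hj
    have hj1 : (d.insert k b).contains j = false := by
      simp [PySem.Dict.contains_insert, hj', beq_iff_eq, hjk]
    rw [PySem.Dict.items_insert_of_contains _ _ hk1, PySem.Dict.items_insert_of_not_contains _ _ hj',
      PySem.Dict.items_insert_of_not_contains _ _ hj1, PySem.Dict.items_insert_of_contains _ _ hk]
    simp [beq_iff_eq, hjk]

lemma pvAdd_comm (d : PySem.Dict Int Int) (j k a b : Int) (hk : d.contains k = true) :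
    pvAdd (pvAdd d j a) k b = pvAdd (pvAdd d k b) j a := by
  by_cases hjk : j = k
  · subst hjk
    rw [pvAdd_same, pvAdd_same, add_comm]
  · unfold pvAdd
    rw [PySem.Dict.getD_insert, PySem.Dict.getD_insert]
    simp only [if_neg (Ne.symm hjk), if_neg hjk]
    exact pv_insert_comm d j k _ _ hjk hk

lemma pvAddAll_cons (d : PySem.Dict Int Int) (p : Int × Int) (l : List (Int × Int)) :
    pvAddAll d (p :: l) = pvAddAll (pvAdd d p.1 p.2) l := rfl

lemma pvAddAll_append (d : PySem.Dict Int Int) (l1 l2 : List (Int × Int)) :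
    pvAddAll d (l1 ++ l2) = pvAddAll (pvAddAll d l1) l2 := by
  simp [pvAddAll, List.foldl_append]

lemma pvAddAll_contains_mono (l : List (Int × Int)) :
    ∀ (d : PySem.Dict Int Int) (k : Int), d.contains k = true → (pvAddAll d l).contains k = true := by
  induction l with
  | nil => intro d k h; exact h
  | cons p l ih =>
    intro d k h
    rw [pvAddAll_cons]
    exact ih _ k (pvAdd_contains_mono d p.1 p.2 k h)

lemma pvAddAll_contains_of_mem (l : List (Int × Int)) :
    ∀ (d : PySem.Dict Int Int) (k : Int), k ∈ l.map (·.1) → (pvAddAll d l).contains k = true := by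
  induction l with
  | nil => intro d k h; simp at h
  | cons p l ih =>
    intro d k h
    rw [pvAddAll_cons]
    simp only [List.map_cons, List.mem_cons] at h
    rcases h with h1 | h1
    · subst h1; exact pvAddAll_contains_mono l _ _ (pvAdd_contains_self d p.1 p.2)
    · exact ih _ k (by simpa using h1)

lemma pvAdd_addAll_comm (l : List (Int × Int)) :
    ∀ (d : PySem.Dict Int Int) (k v : Int), d.contains k = true →
      pvAdd (pvAddAll d l) k v = pvAddAll (pvAdd d k v) l := by
  induction l with
  | nil => intro d k v _; rfl
  | cons p l ih =>
    intro d k v hk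
    rw [pvAddAll_cons, pvAddAll_cons,
      ih (pvAdd d p.1 p.2) k v (pvAdd_contains_mono d p.1 p.2 k hk),
      pvAdd_comm d p.1 k p.2 v hk]

lemma pvAddAll_swap (l1 : List (Int × Int)) (l2 : List (Int × Int)) :
    ∀ (d : PySem.Dict Int Int), (∀ p ∈ l2, d.contains p.1 = true) →
      pvAddAll (pvAddAll d l2) l1 = pvAddAll (pvAddAll d l1) l2 := by
  induction l2 with
  | nil => intro d _; rfl
  | cons q l2 ih =>
    intro d h
    rw [pvAddAll_cons, ih (pvAdd d q.1 q.2)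
        (fun p hp => pvAdd_contains_mono d q.1 q.2 p.1 (h p (List.mem_cons_of_mem q hp))),
      ← pvAdd_addAll_comm l1 d q.1 q.2 (h q (List.mem_cons_self)), pvAddAll_cons]

lemma pvScale_merge (m : List (Int × Int)) :
    ∀ (d : PySem.Dict Int Int) (u v : Int),
      pvAddAll (pvAddAll d (m.map (fun q => (q.1, u * q.2)))) (m.map (fun q => (q.1, v * q.2)))
        = pvAddAll d (m.map (fun q => (q.1, (u + v) * q.2))) := by
  induction m with
  | nil => intro d u v; rfl
  | cons q m ih =>
    intro d u v
    obtain ⟨i, w⟩ := q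
    simp only [List.map_cons, pvAddAll_cons]
    rw [pvAdd_addAll_comm _ (pvAdd d i (u * w)) i (v * w) (pvAdd_contains_self d i (u * w)),
      pvAdd_same]
    have hval : u * w + v * w = (u + v) * w := by ring
    rw [hval, ih (pvAdd d i ((u + v) * w)) u v]

-- ---------- B's per-item step and its commutation properties ----------
lemma pvFoldScale (m : List (Int × Int)) (nf : PySem.Dict Int Int) (v : Int) :
    m.foldl (fun nf q => pvAdd nf q.1 (v * q.2)) nf
      = pvAddAll nf (m.map (fun q => (q.1, v * q.2))) := by
  simp [pvAddAll, List.foldl_map]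

lemma pvStepB_rec (receitas : PvRec) (s : PySem.Dict Int Int × PySem.Dict Int Int) (k v : Int)
    (h : (PySem.Dict.mk receitas).contains k = true) :
    pvStepB receitas s (k, v) = (s.1, pvAddAll s.2 (pvExpand receitas k v)) := by
  simp [pvStepB, h, pvFoldScale, pvExpand]

lemma pvStepB_leaf (receitas : PvRec) (s : PySem.Dict Int Int × PySem.Dict Int Int) (k v : Int)
    (h : ¬ (PySem.Dict.mk receitas).contains k = true) :
    pvStepB receitas s (k, v) = (pvAdd s.1 k v, s.2) := by
  simp [pvStepB, h]

lemma pvStepB_same (receitas : PvRec) (s : PySem.Dict Int Int × PySem.Dict Int Int) (k u v : Int) :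
    pvStepB receitas (pvStepB receitas s (k, u)) (k, v) = pvStepB receitas s (k, u + v) := by
  by_cases h : (PySem.Dict.mk receitas).contains k = true
  · rw [pvStepB_rec receitas s k u h, pvStepB_rec receitas _ k v h, pvStepB_rec receitas s k (u+v) h]
    simp only [pvExpand]
    rw [pvScale_merge]
  · rw [pvStepB_leaf receitas s k u h, pvStepB_leaf receitas _ k v h, pvStepB_leaf receitas s k (u+v) h]
    simp [pvAdd_same]

lemma pvP_after (receitas : PvRec) (s : PySem.Dict Int Int × PySem.Dict Int Int) (k v : Int) :
    pvP receitas (pvStepB receitas s (k, v)) k := by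
  by_cases h : (PySem.Dict.mk receitas).contains k = true
  · rw [pvStepB_rec receitas s k v h]
    simp only [pvP, h, if_pos]
    intro q hq
    apply pvAddAll_contains_of_mem
    simp only [pvExpand, List.map_map]
    exact List.mem_map.mpr ⟨q, hq, rfl⟩
  · rw [pvStepB_leaf receitas s k v h]
    simp only [pvP, h, if_neg, if_false]
    exact pvAdd_contains_self s.1 k v

lemma pvP_mono (receitas : PvRec) (s : PySem.Dict Int Int × PySem.Dict Int Int) (k : Int)
    (p : Int × Int) (h : pvP receitas s k) : pvP receitas (pvStepB receitas s p) k := by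
  obtain ⟨j, w⟩ := p
  by_cases hj : (PySem.Dict.mk receitas).contains j = true
  · rw [pvStepB_rec receitas s j w hj]
    unfold pvP at *
    by_cases hk : (PySem.Dict.mk receitas).contains k = true
    · simp only [hk, if_pos] at *
      exact fun q hq => pvAddAll_contains_mono _ s.2 q.1 (h q hq)
    · simpa [hk] using h
  · rw [pvStepB_leaf receitas s j w hj]
    unfold pvP at *
    by_cases hk : (PySem.Dict.mk receitas).contains k = true
    · simpa [hk] using h
    · simp only [hk, if_neg, if_false] at *
      exact pvAdd_contains_mono s.1 j w k h

lemma pvStepB_comm (receitas : PvRec) (s : PySem.Dict Int Int × PySem.Dict Int Int)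
    (j w k v : Int) (h : pvP receitas s k) :
    pvStepB receitas (pvStepB receitas s (j, w)) (k, v)
      = pvStepB receitas (pvStepB receitas s (k, v)) (j, w) := by
  by_cases hjk : j = k
  · subst hjk
    rw [pvStepB_same, pvStepB_same, add_comm]
  by_cases hj : (PySem.Dict.mk receitas).contains j = true <;>
    by_cases hk : (PySem.Dict.mk receitas).contains k = true
  · -- both recipes
    rw [pvStepB_rec receitas s j w hj, pvStepB_rec receitas _ k v hk,
      pvStepB_rec receitas s k v hk, pvStepB_rec receitas _ j w hj]
    simp only [pvP, hk, if_pos] at h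
    have hpre : ∀ p ∈ pvExpand receitas k v, s.2.contains p.1 = true := by
      intro p hp
      simp only [pvExpand, List.mem_map] at hp
      obtain ⟨q, hq, rfl⟩ := hp
      exact h q hq
    simpa using (pvAddAll_swap (pvExpand receitas j w) (pvExpand receitas k v) s.2 hpre).symm
  · rw [pvStepB_rec receitas s j w hj, pvStepB_leaf receitas _ k v hk,
      pvStepB_leaf receitas s k v hk, pvStepB_rec receitas _ j w hj]
  · rw [pvStepB_leaf receitas s j w hj, pvStepB_rec receitas _ k v hk,
      pvStepB_rec receitas s k v hk, pvStepB_leaf receitas _ j w hj]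
  · -- both leaves
    rw [pvStepB_leaf receitas s j w hj, pvStepB_leaf receitas _ k v hk,
      pvStepB_leaf receitas s k v hk, pvStepB_leaf receitas _ j w hj]
    simp only [pvP, hk, if_neg, if_false] at h
    simp [pvAdd_comm s.1 j k w v h]

lemma pvStepB_fold_comm (receitas : PvRec) (l : List (Int × Int)) :
    ∀ (s : PySem.Dict Int Int × PySem.Dict Int Int) (k v : Int), pvP receitas s k →
      l.foldl (pvStepB receitas) (pvStepB receitas s (k, v))
        = pvStepB receitas (l.foldl (pvStepB receitas) s) (k, v) := by
  induction l with
  | nil => intro s k v _; rfl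
  | cons p l ih =>
    intro s k v h
    obtain ⟨j, w⟩ := p
    simp only [List.foldl_cons]
    rw [← pvStepB_comm receitas s j w k v h, ih (pvStepB receitas s (j, w)) k v (pvP_mono receitas s k (j, w) h)]

-- ---------- folding over the aggregated frontier = folding over the raw level ----------
lemma pv_getD_mk_cons_ne (k0 : Int) (v0 : Int) (t : List (Int × Int)) (k : Int) (h : k0 ≠ k) :
    (PySem.Dict.mk ((k0, v0) :: t)).getD k 0 = (PySem.Dict.mk t).getD k 0 := by
  simp [PySem.Dict.getD_eq_get?_getD, PySem.Dict.get?_mk_cons, beq_iff_eq, h]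

lemma pv_contains_mk_cons_ne (k0 : Int) (v0 : Int) (t : List (Int × Int)) (k : Int) (h : k0 ≠ k) :
    (PySem.Dict.mk ((k0, v0) :: t)).contains k = (PySem.Dict.mk t).contains k := by
  simp [PySem.Dict.contains_mk, beq_iff_eq, h]

lemma pvAdd_mk_cons_ne (k0 v0 : Int) (t : List (Int × Int)) (k v : Int) (h : k0 ≠ k) :
    (pvAdd (PySem.Dict.mk ((k0, v0) :: t)) k v).items
      = (k0, v0) :: (pvAdd (PySem.Dict.mk t) k v).items := by
  unfold pvAdd
  rw [pv_getD_mk_cons_ne k0 v0 t k h]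
  by_cases hc : (PySem.Dict.mk t).contains k = true
  · rw [PySem.Dict.items_insert_of_contains _ _ (by rw [pv_contains_mk_cons_ne k0 v0 t k h]; exact hc),
      PySem.Dict.items_insert_of_contains _ _ hc]
    simp [beq_iff_eq, h]
  · have hc' : (PySem.Dict.mk t).contains k = false := Bool.eq_false_iff.mpr hc
    rw [PySem.Dict.items_insert_of_not_contains _ _ (by rw [pv_contains_mk_cons_ne k0 v0 t k h]; exact hc'),
      PySem.Dict.items_insert_of_not_contains _ _ hc']
    rfl

lemma pvAdd_mk_cons_self (k0 v0 : Int) (t : List (Int × Int)) (v : Int)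
    (hnd : k0 ∉ t.map (·.1)) :
    (pvAdd (PySem.Dict.mk ((k0, v0) :: t)) k0 v).items = (k0, v0 + v) :: t := by
  unfold pvAdd
  have hc : (PySem.Dict.mk ((k0, v0) :: t)).contains k0 = true := by
    simp [PySem.Dict.contains_mk]
  have hg : (PySem.Dict.mk ((k0, v0) :: t)).getD k0 0 = v0 := by
    simp [PySem.Dict.getD_eq_get?_getD, PySem.Dict.get?_mk_cons]
  rw [hg, PySem.Dict.items_insert_of_contains _ _ hc]
  simp only [List.map_cons, beq_self_eq_true, if_pos]
  congr 1
  conv_rhs => rw [← List.map_id t]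
  apply List.map_congr_left
  intro p hp
  show (if (p.1 == k0) = true then (k0, v0 + v) else p) = p
  have : p.1 ≠ k0 := by
    intro he; exact hnd (by simpa [← he] using List.mem_map_of_mem (f := (·.1)) hp)
  simp [beq_iff_eq, this]

lemma pvKU (receitas : PvRec) (t : List (Int × Int)) :
    ∀ (s : PySem.Dict Int Int × PySem.Dict Int Int) (k v : Int), (t.map (·.1)).Nodup →
      List.foldl (pvStepB receitas) s (pvAdd (PySem.Dict.mk t) k v).items
        = pvStepB receitas (List.foldl (pvStepB receitas) s t) (k, v) := by
  induction t with
  | nil =>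
    intro s k v _
    have : (pvAdd (PySem.Dict.mk ([] : List (Int × Int))) k v).items = [(k, 0 + v)] := by
      unfold pvAdd
      rw [PySem.Dict.items_insert_of_not_contains _ _ (by simp [PySem.Dict.contains_mk])]
      simp [PySem.Dict.getD_eq_get?_getD, PySem.Dict.get?]
    rw [this]
    simp
  | cons q t ih =>
    intro s k v hnd
    obtain ⟨k0, v0⟩ := q
    simp only [List.map_cons, List.nodup_cons] at hnd
    by_cases he : k0 = k
    · subst he
      rw [pvAdd_mk_cons_self k0 v0 t v hnd.1]
      simp only [List.foldl_cons]
      rw [← pvStepB_same receitas s k0 v0 v,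
        pvStepB_fold_comm receitas t (pvStepB receitas s (k0, v0)) k0 v
          (pvP_after receitas s k0 v0)]
    · rw [pvAdd_mk_cons_ne k0 v0 t k v he]
      simp only [List.foldl_cons]
      exact ih (pvStepB receitas s (k0, v0)) k v hnd.2

lemma pvGAI (receitas : PvRec) (l : List (Int × Int)) :
    ∀ (e : PySem.Dict Int Int) (s : PySem.Dict Int Int × PySem.Dict Int Int), e.keys.Nodup →
      List.foldl (pvStepB receitas) s (pvAddAll e l).items
        = List.foldl (pvStepB receitas) (List.foldl (pvStepB receitas) s e.items) l := by
  induction l with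
  | nil => intro e s _; rfl
  | cons p l ih =>
    intro e s he
    obtain ⟨k, v⟩ := p
    rw [pvAddAll_cons, ih (pvAdd e k v) s (pvAdd_nodup e k v he)]
    obtain ⟨te⟩ := e
    rw [pvKU receitas te s k v (by simpa [PySem.Dict.keys_mk] using he)]
    rfl

-- ---------- one pass over a level computes leaf totals and aggregated children ----------
lemma pvFold_char (receitas : PvRec) (l : List (Int × Int)) :
    ∀ (t nf : PySem.Dict Int Int),
      List.foldl (pvStepB receitas) (t, nf) l
        = (pvLeafAdd receitas t l, pvAddAll nf (pvChildren receitas l)) := by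
  induction l with
  | nil => intro t nf; simp [pvLeafAdd, pvChildren, pvAddAll]
  | cons p l ih =>
    intro t nf
    obtain ⟨k, v⟩ := p
    simp only [List.foldl_cons]
    by_cases h : (PySem.Dict.mk receitas).contains k = true
    · rw [pvStepB_rec receitas (t, nf) k v h, ih t _,
        pvLeafAdd_cons_rec receitas t (k, v) l h, pvChildren_cons]
      simp [h, pvAddAll_append]
    · rw [pvStepB_leaf receitas (t, nf) k v h, ih _ nf,
        pvLeafAdd_cons_leaf receitas t (k, v) l h, pvChildren_cons]
      simp [h]

-- ---------- nonemptiness and Nodup bookkeeping ----------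
lemma pvAdd_items_ne_nil (d : PySem.Dict Int Int) (k v : Int) : (pvAdd d k v).items ≠ [] := by
  unfold pvAdd
  by_cases h : d.contains k = true
  · rw [PySem.Dict.items_insert_of_contains _ _ h]
    have : d.items ≠ [] := by
      intro he
      rw [show d = PySem.Dict.mk d.items from rfl, he] at h
      simp [PySem.Dict.contains_mk] at h
    simpa using this
  · rw [PySem.Dict.items_insert_of_not_contains _ _ (by simpa using h)]
    simp

lemma pvAddAll_items_ne_nil (l : List (Int × Int)) :
    ∀ (d : PySem.Dict Int Int), d.items ≠ [] → (pvAddAll d l).items ≠ [] := by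
  induction l with
  | nil => intro d h; exact h
  | cons p l ih => intro d _; rw [pvAddAll_cons]; exact ih _ (pvAdd_items_ne_nil d p.1 p.2)

lemma pvRun_nil (receitas : PvRec) :
    ∀ (n : Nat) (t : PySem.Dict Int Int), pvRun receitas n t [] = t := by
  intro n
  induction n with
  | zero => intro t; rfl
  | succ n ih =>
    intro t
    show pvRun receitas n (pvLeafAdd receitas t []) (pvChildren receitas []) = t
    simpa [pvLeafAdd, pvChildren] using ih t

-- ---------- B runs the same level recursion ----------
lemma pvLoopB_run (receitas : PvRec) :
    ∀ (n : Nat) (t : PySem.Dict Int Int) (lvl : List (Int × Int)),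
      pvLoopB receitas n t (pvAddAll PySem.Dict.empty lvl) = pvRun receitas n t lvl := by
  intro n
  induction n with
  | zero => intro t lvl; rfl
  | succ n ih =>
    intro t lvl
    match lvl with
    | [] => simp [pvLoopB, pvAddAll, PySem.Dict.empty, pvRun_nil]
    | p :: l =>
      have hne : (pvAddAll PySem.Dict.empty (p :: l)).items ≠ [] := by
        rw [pvAddAll_cons]
        exact pvAddAll_items_ne_nil l _ (pvAdd_items_ne_nil PySem.Dict.empty p.1 p.2)
      have hfold : (pvAddAll PySem.Dict.empty (p :: l)).items.foldl (pvStepB receitas)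
          (t, PySem.Dict.empty)
          = (pvLeafAdd receitas t (p :: l),
             pvAddAll PySem.Dict.empty (pvChildren receitas (p :: l))) := by
        rw [pvGAI receitas (p :: l) PySem.Dict.empty (t, PySem.Dict.empty)
            PySem.Dict.nodup_keys_empty]
        exact pvFold_char receitas (p :: l) t PySem.Dict.empty
      show (if (pvAddAll PySem.Dict.empty (p :: l)).items = [] then t
        else pvLoopB receitas n
          ((pvAddAll PySem.Dict.empty (p :: l)).items.foldl (pvStepB receitas) (t, PySem.Dict.empty)).1
          ((pvAddAll PySem.Dict.empty (p :: l)).items.foldl (pvStepB receitas) (t, PySem.Dict.empty)).2)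
        = pvRun receitas (n+1) t (p :: l)
      rw [if_neg hne, hfold]
      exact ih (pvLeafAdd receitas t (p :: l)) (pvChildren receitas (p :: l))

-- ===== VERDICT (by name: the statement is the Claim_ definition above) =====
theorem calcular_ingredientes_spec : Claim_equal_calcular_ingredientes := by
  intro id_item receitas quantidade_desejada _ _
  unfold Spec_calcular_ingredientes calcular_ingredientes calcular_ingredientes_alt
  rw [pvLoopA_run receitas (receitas.length + 2) PySem.Dict.empty
      [(id_item, quantidade_desejada)]]
  have hinit : PySem.Dict.empty.insert id_item quantidade_desejada
      = pvAddAll PySem.Dict.empty [(id_item, quantidade_desejada)] := by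
    show _ = pvAdd PySem.Dict.empty id_item quantidade_desejada
    unfold pvAdd
    rw [PySem.Dict.getD_of_not_contains _ _ (by simp [PySem.Dict.empty, PySem.Dict.contains_mk])]
    rw [zero_add]
  rw [hinit, pvLoopB_run receitas (receitas.length + 2) PySem.Dict.empty
      [(id_item, quantidade_desejada)]]
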